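-- pv_equiv track=rewrite | github.com/Melodiz/CodeRun | Algorithms/Easy/23_first-vertex/solution.py | find_reachable_vertices
-- ===== SOURCE A (Python) =====
-- def find_reachable_vertices(n, edges):
--     from collections import defaultdict, deque
--
--     # Построение обратного графа
--     reverse_graph = defaultdict(list)
--     for u, v in edges:
--         reverse_graph[v].append(u)
--
--     # Поиск в ширину (BFS) из первой вершины в обратном графе
--     reachable = set()
--     queue = deque([1])
--     while queue:
--         vertex = queue.popleft()
--         if vertex not in reachable:
--             reachable.add(vertex)
--             for neighbor in reverse_graph[vertex]:
--                 if neighbor not in reachable: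
--                     queue.append(neighbor)
--
--     # Возвращаем отсортированный список достижимых вершин
--     return sorted(reachable)
-- ===== SOURCE B (Python) =====
-- def find_reachable_vertices(n, edges):
--     # Bellman-Ford-style saturation: repeatedly sweep the edge list,
--     # pulling u into the reachable set whenever v is already there,
--     # until a full sweep changes nothing.
--     reachable = {1}
--     changed = True
--     while changed:
--         changed = False
--         for u, v in edges:
--             if v in reachable and u not in reachable:
--                 reachable.add(u)
--                 changed = True
--     return sorted(reachable)
-- ===== Notes on version B (the rewrite author's own statement) =====
-- stated objective: alternative
-- what changed: Replaces the reverse-adjacency-map BFS with a deque by a Bellman-Ford-style fixpoint: repeatedly sweep the raw edge list adding u whenever v is reachable, until a sweep changes nothing; no adjacency map and no queue are built.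
import Mathlib
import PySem

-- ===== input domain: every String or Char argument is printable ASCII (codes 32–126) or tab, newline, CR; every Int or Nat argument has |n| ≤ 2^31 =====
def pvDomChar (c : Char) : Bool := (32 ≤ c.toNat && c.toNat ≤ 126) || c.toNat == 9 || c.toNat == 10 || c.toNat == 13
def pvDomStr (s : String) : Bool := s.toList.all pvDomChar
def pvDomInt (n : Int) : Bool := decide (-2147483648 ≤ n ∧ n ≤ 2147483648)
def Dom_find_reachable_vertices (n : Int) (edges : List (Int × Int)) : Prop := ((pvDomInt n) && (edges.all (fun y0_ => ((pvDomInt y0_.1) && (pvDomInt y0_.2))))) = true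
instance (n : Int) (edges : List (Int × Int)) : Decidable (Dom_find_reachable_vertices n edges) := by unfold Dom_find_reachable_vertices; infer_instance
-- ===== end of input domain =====

-- B replaces A's reverse-adjacency-map BFS by a Bellman-Ford-style fixpoint sweep of the raw
-- edge list (alternative algorithm, no adjacency map and no queue); same sorted result.

-- ===== PORT A =====
-- reverse_graph = defaultdict(list); for u, v in edges: reverse_graph[v].append(u)
def pvRevAdj (edges : List (Int × Int)) : PySem.Dict Int (List Int) :=
  edges.foldl (fun d e => d.modify e.2 [] (fun l => l ++ [e.1])) PySem.Dict.empty

-- the BFS while-loop; fuel merely makes the (always terminating) loop total: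
-- (edges.length+1)^2+1 provably exceeds the number of iterations (see the lemmas below)
def pvBFS (adj : PySem.Dict Int (List Int)) : Nat → PySem.Set Int → List Int → PySem.Set Int
  | 0, r, _ => r
  | _ + 1, r, [] => r
  | fuel + 1, r, v :: q =>
      if v ∈ r then pvBFS adj fuel r q
      else
        let r' := PySem.Set.add r v
        pvBFS adj fuel r'
          ((adj.getD v []).foldl (fun acc nb => if nb ∉ r' then acc ++ [nb] else acc) q)

def find_reachable_vertices (n : Int) (edges : List (Int × Int)) : List Int :=
  PySem.List.sorted
    (pvBFS (pvRevAdj edges) ((edges.length + 1) * (edges.length + 1) + 1) PySem.Set.empty [1])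
    (fun x => x) false

-- ===== PORT B =====
-- one sweep "for u, v in edges: if v in reachable and u not in reachable: reachable.add(u); changed = True"
def pvSweep (edges : List (Int × Int)) (st : PySem.Set Int × Bool) : PySem.Set Int × Bool :=
  edges.foldl
    (fun s e => if e.2 ∈ s.1 ∧ e.1 ∉ s.1 then (PySem.Set.add s.1 e.1, true) else s) st

-- the while-changed loop; fuel merely makes the (always terminating) loop total
def pvSaturate (edges : List (Int × Int)) : Nat → PySem.Set Int → PySem.Set Int
  | 0, r => r
  | fuel + 1, r =>
      let st := pvSweep edges (r, false)
      if st.2 then pvSaturate edges fuel st.1 else st.1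

def find_reachable_vertices_alt (n : Int) (edges : List (Int × Int)) : List Int :=
  PySem.List.sorted (pvSaturate edges (edges.length + 1) (PySem.Set.ofList [1]))
    (fun x => x) false

-- ===== PRECONDITION & SPEC =====
def Spec_find_reachable_vertices (n : Int) (edges : List (Int × Int)) (out : List Int) : Prop := out = find_reachable_vertices_alt n edges
instance (n : Int) (edges : List (Int × Int)) (out : List Int) : Decidable (Spec_find_reachable_vertices n edges out) := by unfold Spec_find_reachable_vertices; infer_instance

-- ===== CLAIM (what is proved, stated in full; the proofs are below) =====
def Claim_equal_find_reachable_vertices : Prop := ∀ (n : Int) (edges : List (Int × Int)), Dom_find_reachable_vertices n edges → Spec_find_reachable_vertices n edges (find_reachable_vertices n edges)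

-- ===== LEMMAS AND PROOFS =====

-- vertices that can reach 1 along the (forward) edge list
inductive PyReach (edges : List (Int × Int)) : Int → Prop
  | one : PyReach edges 1
  | step (u v : Int) : PyReach edges v → (u, v) ∈ edges → PyReach edges u

lemma reach_subset {edges : List (Int × Int)} {F : List Int} (h1 : (1 : Int) ∈ F)
    (hc : ∀ u v : Int, (u, v) ∈ edges → v ∈ F → u ∈ F) :
    ∀ x, PyReach edges x → x ∈ F := by
  intro x hx
  induction hx with
  | one => exact h1
  | step u v _ he ih => exact hc u v he ih

lemma revAdj_getD (edges : List (Int × Int)) (v : Int) :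
    (pvRevAdj edges).getD v [] =
      ((edges.map Prod.swap).filter (fun p => p.1 == v)).map (·.2) := by
  have h := PySem.Dict.getD_foldl_modify_append (l := edges.map Prod.swap) (d := PySem.Dict.empty) (c := v)
  simpa [pvRevAdj, List.foldl_map, PySem.Dict.getD_empty] using h

lemma mem_revAdj (edges : List (Int × Int)) (u v : Int) :
    u ∈ (pvRevAdj edges).getD v [] ↔ (u, v) ∈ edges := by
  rw [revAdj_getD]; simp [List.mem_map, List.mem_filter]

lemma length_revAdj (edges : List (Int × Int)) (v : Int) :
    ((pvRevAdj edges).getD v []).length ≤ edges.length := by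
  rw [revAdj_getD]
  calc (((edges.map Prod.swap).filter (fun p => p.1 == v)).map (·.2)).length
      = ((edges.map Prod.swap).filter (fun p => p.1 == v)).length := List.length_map ..
    _ ≤ (edges.map Prod.swap).length := List.length_filter_le ..
    _ = edges.length := List.length_map ..

lemma filter_sub_length {C r : List Int} {v : Int} (hv : v ∈ C) (hvr : v ∉ r) :
    (C.filter (fun x => decide (x ∉ r ++ [v]))).length <
      (C.filter (fun x => decide (x ∉ r))).length := by
  have hsub : C.filter (fun x => decide (x ∉ r ++ [v]))
      = (C.filter (fun x => decide (x ∉ r))).filter (fun x => decide (x ∉ r ++ [v])) := by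
    rw [List.filter_filter]
    apply List.filter_congr
    intro x _
    by_cases h : x ∈ r ++ [v] <;> simp [h] <;> intro h2 <;> simp [List.mem_append] at h <;> tauto
  rw [hsub]
  apply List.length_filter_lt_length_iff_exists.mpr
  refine ⟨v, ?_, by simp⟩
  simp [List.mem_filter, hv, hvr]

lemma bfs_spec (edges : List (Int × Int)) :
    ∀ (fuel : Nat) (r q : List Int),
      r.Nodup →
      (∀ x ∈ q, x ∈ (1 : Int) :: edges.map (·.1)) →
      (∀ x ∈ r, PyReach edges x) →
      (∀ x ∈ q, PyReach edges x) →
      (∀ v ∈ r, ∀ u : Int, (u, v) ∈ edges → u ∈ r ∨ u ∈ q) →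
      q.length + (edges.length + 1) *
        (((1 :: edges.map (·.1)).filter (fun x => decide (x ∉ r))).length) ≤ fuel →
      (pvBFS (pvRevAdj edges) fuel r q).Nodup ∧
      (∀ x ∈ r, x ∈ pvBFS (pvRevAdj edges) fuel r q) ∧
      (∀ x ∈ q, x ∈ pvBFS (pvRevAdj edges) fuel r q) ∧
      (∀ x ∈ pvBFS (pvRevAdj edges) fuel r q, PyReach edges x) ∧
      (∀ v ∈ pvBFS (pvRevAdj edges) fuel r q, ∀ u : Int,
        (u, v) ∈ edges → u ∈ pvBFS (pvRevAdj edges) fuel r q) := by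
  intro fuel
  induction fuel with
  | zero =>
    intro r q hnd hqc hr hq hcl hfuel
    have hq0 : q = [] := List.eq_nil_of_length_eq_zero (by omega)
    subst hq0
    simp only [pvBFS]
    refine ⟨hnd, fun x hx => hx, by simp, hr, ?_⟩
    intro v hv u hu
    rcases hcl v hv u hu with h | h
    · exact h
    · simp at h
  | succ fuel ih =>
    intro r q hnd hqc hr hq hcl hfuel
    cases q with
    | nil =>
      simp only [pvBFS]
      refine ⟨hnd, fun x hx => hx, by simp, hr, ?_⟩
      intro v hv u hu
      rcases hcl v hv u hu with h | h
      · exact h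
      · simp at h
    | cons v q =>
      by_cases hv : v ∈ r
      · have hstep : pvBFS (pvRevAdj edges) (fuel + 1) r (v :: q) = pvBFS (pvRevAdj edges) fuel r q := by
          simp only [pvBFS, if_pos hv]
        rw [hstep]
        have hcl' : ∀ w ∈ r, ∀ u : Int, (u, w) ∈ edges → u ∈ r ∨ u ∈ q := by
          intro w hw u hu
          rcases hcl w hw u hu with h | h
          · exact Or.inl h
          · rcases List.mem_cons.mp h with h | h
            · subst h; exact Or.inl hv
            · exact Or.inr h
        obtain ⟨a1, a2, a3, a4, a5⟩ := ih r q hnd (fun x hx => hqc x (by simp [hx]))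
          hr (fun x hx => hq x (by simp [hx])) hcl' (by simp only [List.length_cons] at hfuel; omega)
        refine ⟨a1, a2, ?_, a4, a5⟩
        intro x hx
        rcases List.mem_cons.mp hx with h | h
        · subst h; exact a2 x hv
        · exact a3 x h
      · have hadd : PySem.Set.add r v = r ++ [v] := by
          simp [PySem.Set.add, PySem.Set.contains_eq_listContains]
          intro hmem; exact absurd hmem hv
        have hstep : pvBFS (pvRevAdj edges) (fuel + 1) r (v :: q)
            = pvBFS (pvRevAdj edges) fuel (PySem.Set.add r v)
              (q ++ ((pvRevAdj edges).getD v []).filter (fun nb => decide (nb ∉ PySem.Set.add r v))) := by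
          simp only [pvBFS, if_neg hv]
          rw [PySem.List.foldl_append_ite_eq_filter]
        rw [hstep]
        have hvc : v ∈ (1 : Int) :: edges.map (·.1) := hqc v (by simp)
        have hvreach : PyReach edges v := hq v (by simp)
        have hnd' : (PySem.Set.add r v).Nodup := PySem.Set.nodup_add _ _ hnd
        have hmem_add : ∀ x : Int, x ∈ PySem.Set.add r v ↔ x ∈ r ∨ x = v := by
          intro x; exact PySem.Set.mem_add _ _ _
        have hqc' : ∀ x ∈ q ++ ((pvRevAdj edges).getD v []).filter (fun nb => decide (nb ∉ PySem.Set.add r v)),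
            x ∈ (1 : Int) :: edges.map (·.1) := by
          intro x hx
          rcases List.mem_append.mp hx with h | h
          · exact hqc x (by simp [h])
          · have hxadj := (List.mem_filter.mp h).1
            have := (mem_revAdj edges x v).mp hxadj
            simp only [List.mem_cons, List.mem_map]
            exact Or.inr ⟨(x, v), this, rfl⟩
        have hr' : ∀ x ∈ PySem.Set.add r v, PyReach edges x := by
          intro x hx
          rcases (hmem_add x).mp hx with h | h
          · exact hr x h
          · subst h; exact hvreach
        have hq' : ∀ x ∈ q ++ ((pvRevAdj edges).getD v []).filter (fun nb => decide (nb ∉ PySem.Set.add r v)),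
            PyReach edges x := by
          intro x hx
          rcases List.mem_append.mp hx with h | h
          · exact hq x (by simp [h])
          · have hxadj := (List.mem_filter.mp h).1
            exact PyReach.step x v hvreach ((mem_revAdj edges x v).mp hxadj)
        have hcl' : ∀ w ∈ PySem.Set.add r v, ∀ u : Int, (u, w) ∈ edges →
            u ∈ PySem.Set.add r v ∨ u ∈ q ++ ((pvRevAdj edges).getD v []).filter (fun nb => decide (nb ∉ PySem.Set.add r v)) := by
          intro w hw u hu
          rcases (hmem_add w).mp hw with h | h
          · rcases hcl w h u hu with h2 | h2
            · exact Or.inl ((hmem_add u).mpr (Or.inl h2))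
            · rcases List.mem_cons.mp h2 with h2 | h2
              · subst h2; exact Or.inl ((hmem_add u).mpr (Or.inr rfl))
              · exact Or.inr (List.mem_append.mpr (Or.inl h2))
          · rw [h] at hu
            by_cases hu2 : u ∈ PySem.Set.add r v
            · exact Or.inl hu2
            · refine Or.inr (List.mem_append.mpr (Or.inr ?_))
              refine List.mem_filter.mpr ⟨(mem_revAdj edges u v).mpr hu, by simpa using hu2⟩
        -- fuel accounting
        have hfuel' : (q ++ ((pvRevAdj edges).getD v []).filter (fun nb => decide (nb ∉ PySem.Set.add r v))).length
            + (edges.length + 1) *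
              (((1 :: edges.map (·.1)).filter (fun x => decide (x ∉ PySem.Set.add r v))).length) ≤ fuel := by
          have hlenq : (q ++ ((pvRevAdj edges).getD v []).filter (fun nb => decide (nb ∉ PySem.Set.add r v))).length
              ≤ q.length + edges.length := by
            rw [List.length_append]
            have h1 : (((pvRevAdj edges).getD v []).filter (fun nb => decide (nb ∉ PySem.Set.add r v))).length
                ≤ ((pvRevAdj edges).getD v []).length := List.length_filter_le ..
            have h2 := length_revAdj edges v
            omega
          have hLL : (((1 :: edges.map (·.1)).filter (fun x => decide (x ∉ PySem.Set.add r v))).length) + 1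
              ≤ (((1 :: edges.map (·.1)).filter (fun x => decide (x ∉ r))).length) := by
            rw [hadd]
            exact filter_sub_length hvc hv
          set L' := (((1 :: edges.map (·.1)).filter (fun x => decide (x ∉ PySem.Set.add r v))).length) with hL'
          set L := (((1 :: edges.map (·.1)).filter (fun x => decide (x ∉ r))).length) with hL
          have hmul : (edges.length + 1) * L' + (edges.length + 1) ≤ (edges.length + 1) * L := by
            calc (edges.length + 1) * L' + (edges.length + 1)
                = (edges.length + 1) * (L' + 1) := by ring
              _ ≤ (edges.length + 1) * L := Nat.mul_le_mul_left _ hLL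
          simp only [List.length_cons] at hfuel
          linarith
        obtain ⟨a1, a2, a3, a4, a5⟩ := ih (PySem.Set.add r v) _ hnd' hqc' hr' hq' hcl' hfuel'
        refine ⟨a1, ?_, ?_, a4, a5⟩
        · intro x hx
          exact a2 x ((hmem_add x).mpr (Or.inl hx))
        · intro x hx
          rcases List.mem_cons.mp hx with h | h
          · subst h; exact a2 x ((hmem_add x).mpr (Or.inr rfl))
          · exact a3 x (List.mem_append.mpr (Or.inl h))

lemma sweep_subset (edges : List (Int × Int)) :
  ∀ (l : List (Int × Int)) (r : List Int) (b : Bool),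
    r ⊆ (l.foldl (fun s e => if e.2 ∈ s.1 ∧ e.1 ∉ s.1 then (PySem.Set.add s.1 e.1, true) else s) (r, b)).1 := by
  intro l
  induction l with
  | nil => intro r b; simp
  | cons e l ih =>
    intro r b
    simp only [List.foldl_cons]
    by_cases h : e.2 ∈ r ∧ e.1 ∉ r
    · simp only [if_pos h]
      intro x hx
      exact ih _ _ (by simp [PySem.Set.mem_add]; left; exact hx)
    · simp only [if_neg h]; exact ih r b

lemma sweep_spec (edges : List (Int × Int)) :
    ∀ (l : List (Int × Int)) (r : List Int) (b : Bool),
      (∀ e ∈ l, e ∈ edges) →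
      r.Nodup →
      (∀ x ∈ r, PyReach edges x) →
      (∀ x ∈ r, x ∈ (1 : Int) :: edges.map (·.1)) →
      (let res := l.foldl (fun s e => if e.2 ∈ s.1 ∧ e.1 ∉ s.1 then (PySem.Set.add s.1 e.1, true) else s) (r, b)
       res.1.Nodup ∧
       (∀ x ∈ res.1, PyReach edges x) ∧
       (∀ x ∈ res.1, x ∈ (1 : Int) :: edges.map (·.1)) ∧
       (b = true → res.2 = true) ∧
       (res.2 = false → res.1 = r ∧ ∀ e ∈ l, e.2 ∈ r → e.1 ∈ r) ∧
       (res.2 = true → b = false → r.length < res.1.length)) := by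
  intro l
  induction l with
  | nil =>
    intro r b hl hnd hr hc
    refine ⟨hnd, hr, hc, by simp, by simp, by simp_all⟩
  | cons e l ih =>
    intro r b hl hnd hr hc
    simp only [List.foldl_cons]
    by_cases h : e.2 ∈ r ∧ e.1 ∉ r
    · simp only [if_pos h]
      have he : e ∈ edges := hl e (by simp)
      have hadd : PySem.Set.add r e.1 = r ++ [e.1] := by
        simp [PySem.Set.add, PySem.Set.contains_eq_listContains]
        intro hmem
        exact absurd hmem h.2
      have hnd' : (PySem.Set.add r e.1).Nodup := PySem.Set.nodup_add _ _ hnd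
      have hr' : ∀ x ∈ PySem.Set.add r e.1, PyReach edges x := by
        intro x hx
        rcases (PySem.Set.mem_add _ _ _).mp hx with hx | hx
        · exact hr x hx
        · subst hx
          exact PyReach.step e.1 e.2 (hr _ h.1) (by simpa using he)
      have hc' : ∀ x ∈ PySem.Set.add r e.1, x ∈ (1 : Int) :: edges.map (·.1) := by
        intro x hx
        rcases (PySem.Set.mem_add _ _ _).mp hx with hx | hx
        · exact hc x hx
        · subst hx
          simp only [List.mem_cons, List.mem_map]
          exact Or.inr ⟨e, he, rfl⟩
      obtain ⟨a1, a2, a3, a4, a5, a6⟩ := ih (PySem.Set.add r e.1) true (fun e he => hl e (by simp [he])) hnd' hr' hc'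
      refine ⟨a1, a2, a3, fun _ => a4 rfl, ?_, ?_⟩
      · intro hfalse
        exact absurd (a4 rfl) (by simp [hfalse])
      · intro _ _
        have hlen : r.length < (PySem.Set.add r e.1).length := by
          rw [hadd]; simp
        have hmono : ∀ (l' : List (Int × Int)) (r' : List Int) (b' : Bool), r'.length ≤
            (l'.foldl (fun s e => if e.2 ∈ s.1 ∧ e.1 ∉ s.1 then (PySem.Set.add s.1 e.1, true) else s) (r', b')).1.length := by
          intro l'
          induction l' with
          | nil => intro r' b'; simp
          | cons e' l' ih' =>
            intro r' b'
            simp only [List.foldl_cons]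
            by_cases h' : e'.2 ∈ r' ∧ e'.1 ∉ r'
            · simp only [if_pos h']
              calc r'.length ≤ (PySem.Set.add r' e'.1).length := by
                    simp [PySem.Set.add]; split <;> simp
                _ ≤ _ := ih' _ _
            · simp only [if_neg h']; exact ih' r' b'
        exact lt_of_lt_of_le hlen (hmono l _ true)
    · simp only [if_neg h]
      obtain ⟨a1, a2, a3, a4, a5, a6⟩ := ih r b (fun e he => hl e (by simp [he])) hnd hr hc
      refine ⟨a1, a2, a3, a4, ?_, ?_⟩
      · intro hfalse
        obtain ⟨b1, b2⟩ := a5 hfalse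
        refine ⟨b1, ?_⟩
        intro e' he'
        rcases List.mem_cons.mp he' with he' | he'
        · subst he'
          intro hv
          by_contra hu
          exact h ⟨hv, hu⟩
        · exact b2 e' he'
      · exact a6

lemma saturate_spec (edges : List (Int × Int)) :
    ∀ (fuel : Nat) (r : List Int),
      r.Nodup →
      (∀ x ∈ r, PyReach edges x) →
      (∀ x ∈ r, x ∈ (1 : Int) :: edges.map (·.1)) →
      (1 : Int) ∈ r →
      edges.length + 2 ≤ fuel + r.length →
      (pvSaturate edges fuel r).Nodup ∧
      ((1 : Int) ∈ pvSaturate edges fuel r) ∧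
      (∀ x ∈ pvSaturate edges fuel r, PyReach edges x) ∧
      (∀ u v : Int, (u, v) ∈ edges → v ∈ pvSaturate edges fuel r → u ∈ pvSaturate edges fuel r) := by
  intro fuel
  induction fuel with
  | zero =>
    intro r hnd _ hcand _ hfuel
    exfalso
    have hsub : r ⊆ (1 : Int) :: edges.map (·.1) := fun x hx => hcand x hx
    have hlen : r.length ≤ ((1 : Int) :: edges.map (·.1)).length :=
      (List.subperm_of_subset hnd hsub).length_le
    simp at hlen
    omega
  | succ fuel ih =>
    intro r hnd hreach hcand h1 hfuel
    obtain ⟨a1, a2, a3, _, a5, a6⟩ :=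
      sweep_spec edges edges r false (fun _ h => h) hnd hreach hcand
    simp only [pvSaturate]
    by_cases hch : (pvSweep edges (r, false)).2 = true
    · rw [if_pos hch]
      have hlt : r.length < (pvSweep edges (r, false)).1.length := a6 hch rfl
      have hsub := sweep_subset edges edges r false
      exact ih (pvSweep edges (r, false)).1 a1 a2 a3 (hsub h1) (by omega)
    · rw [if_neg hch]
      obtain ⟨hb1, hb2⟩ := a5 (by simpa using hch)
      have hb1' : (pvSweep edges (r, false)).1 = r := hb1
      refine ⟨a1, by rw [hb1']; exact h1, a2, ?_⟩
      intro u v huv hv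
      rw [hb1'] at hv ⊢
      exact hb2 (u, v) huv hv

-- ===== VERDICT (by name: the statement is the Claim_ definition above) =====
theorem find_reachable_vertices_spec : Claim_equal_find_reachable_vertices := by
  intro n edges _
  unfold Spec_find_reachable_vertices find_reachable_vertices find_reachable_vertices_alt
  obtain ⟨a1, a2, a3, a4, a5⟩ :=
    bfs_spec edges ((edges.length + 1) * (edges.length + 1) + 1) PySem.Set.empty [1]
      (by simp [PySem.Set.empty])
      (by intro x hx; simp at hx; simp [hx])
      (by intro x hx; simp [PySem.Set.empty] at hx)
      (by intro x hx; simp at hx; subst hx; exact PyReach.one)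
      (by intro w hw; simp [PySem.Set.empty] at hw)
      (by
        have hfl : ((1 :: edges.map (·.1)).filter
            (fun x => decide (x ∉ (PySem.Set.empty : PySem.Set Int)))) = 1 :: edges.map (·.1) := by
          simp [PySem.Set.empty]
        rw [hfl]
        simp only [List.length_cons, List.length_map, List.length_nil]
        linarith)
  obtain ⟨b1, b2, b3, b4⟩ :=
    saturate_spec edges (edges.length + 1) (PySem.Set.ofList [1])
      (PySem.Set.nodup_ofList _)
      (by intro x hx; simp [PySem.Set.ofList] at hx; subst hx; exact PyReach.one)
      (by intro x hx; simp [PySem.Set.ofList] at hx; simp [hx])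
      (by simp [PySem.Set.ofList])
      (by rw [show (PySem.Set.ofList ([1] : List Int)) = [1] from rfl]; simp)
  have hFA : ∀ x : Int, x ∈ pvBFS (pvRevAdj edges) ((edges.length + 1) * (edges.length + 1) + 1)
      PySem.Set.empty [1] ↔ PyReach edges x := by
    intro x
    constructor
    · exact a4 x
    · exact reach_subset (a3 1 (by simp)) (fun u v huv hv => a5 v hv u huv) x
  have hFB : ∀ x : Int, x ∈ pvSaturate edges (edges.length + 1) (PySem.Set.ofList [1]) ↔
      PyReach edges x := by
    intro x
    constructor
    · exact b3 x
    · exact reach_subset b2 b4 x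
  have hperm : (pvBFS (pvRevAdj edges) ((edges.length + 1) * (edges.length + 1) + 1)
      PySem.Set.empty [1]).Perm (pvSaturate edges (edges.length + 1) (PySem.Set.ofList [1])) := by
    rw [List.perm_ext_iff_of_nodup a1 b1]
    intro a
    rw [hFA, hFB]
  exact PySem.List.sorted_eq_sorted_of_perm _ _ (fun x => x) (fun a b h => h) hperm
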